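-- pv_equiv track=rewrite | github.com/Felix0942364/Algorithms | Baekjoon/14696.py | solve
-- ===== SOURCE A (Python) =====
-- def solve(a, a_lst, b, b_lst):
--     a_lst.sort(); b_lst.sort()
--     while a_lst and b_lst:
--         a_val = a_lst.pop()
--         b_val = b_lst.pop()
--         if a_val > b_val:
--             return 'A'
--         elif a_val < b_val:
--             return 'B'
--     if a_lst:
--         return 'A'
--     elif b_lst:
--         return 'B'
--     else:
--         return 'D'
-- ===== SOURCE B (Python) =====
-- def solve(a, a_lst, b, b_lst):
--     diff = {}
--     for x in a_lst:
--         diff[x] = diff.get(x, 0) + 1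
--     for y in b_lst:
--         diff[y] = diff.get(y, 0) - 1
--     keys = [k for k, v in diff.items() if v != 0]
--     if not keys:
--         return 'D'
--     return 'A' if diff[max(keys)] > 0 else 'B'
-- ===== Notes on version B (the rewrite author's own statement) =====
-- stated objective: alternative
-- what changed: Replaces sort-both-lists-then-pop-maxima-pairwise with a single hash-map of count differences per value: the sign of the difference at the largest key with a nonzero difference decides, with no sorting.
import Mathlib
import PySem

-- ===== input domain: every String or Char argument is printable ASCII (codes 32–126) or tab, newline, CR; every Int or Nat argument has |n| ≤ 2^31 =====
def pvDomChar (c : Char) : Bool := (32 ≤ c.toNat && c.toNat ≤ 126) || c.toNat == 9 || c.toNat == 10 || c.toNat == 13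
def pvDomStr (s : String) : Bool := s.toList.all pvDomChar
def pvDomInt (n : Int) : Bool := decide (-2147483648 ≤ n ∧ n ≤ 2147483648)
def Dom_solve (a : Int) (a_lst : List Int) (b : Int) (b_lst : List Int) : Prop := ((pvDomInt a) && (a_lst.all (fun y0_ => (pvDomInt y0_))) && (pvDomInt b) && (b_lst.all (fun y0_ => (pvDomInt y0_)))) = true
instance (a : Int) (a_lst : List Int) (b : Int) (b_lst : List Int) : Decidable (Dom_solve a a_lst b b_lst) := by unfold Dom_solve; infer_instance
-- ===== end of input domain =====

-- B replaces A's sort-both-then-pop-maxima loop by a hash map of count differences (no sort);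
-- the equivalence is about the RETURN value only: the Python A sorts and pops its list arguments in place, B does not mutate them.

-- ===== PORT A =====
-- the 'while a_lst and b_lst: pop both maxima and compare' loop of A (lists kept sorted ascending, pop takes the last element)
def solveLoopA (xs ys : List Int) : String :=
  if h : xs ≠ [] ∧ ys ≠ [] then
    let a_val := xs.getLast h.1
    let b_val := ys.getLast h.2
    if a_val > b_val then "A"
    else if a_val < b_val then "B"
    else solveLoopA xs.dropLast ys.dropLast
  else
    if xs ≠ [] then "A"
    else if ys ≠ [] then "B"
    else "D"
termination_by xs.length
decreasing_by
  have h1 : 0 < xs.length := List.length_pos_iff.mpr h.1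
  simp [List.length_dropLast]
  omega

def solve (a : Int) (a_lst : List Int) (b : Int) (b_lst : List Int) : String :=
  solveLoopA (PySem.List.sorted a_lst (fun x => x) false) (PySem.List.sorted b_lst (fun x => x) false)

-- ===== PORT B =====
def solve_alt (a : Int) (a_lst : List Int) (b : Int) (b_lst : List Int) : String :=
  let diff0 := a_lst.foldl (fun d x => d.insert x (d.getD x 0 + 1)) (PySem.Dict.empty : PySem.Dict Int Int)
  let diff := b_lst.foldl (fun d y => d.insert y (d.getD y 0 - 1)) diff0
  let keys := (diff.items.filter (fun kv => kv.2 != 0)).map Prod.fst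
  match PySem.List.max? keys (fun k => k) with
  | none => "D"          -- 'if not keys: return D' (max? is none exactly on the empty list)
  | some m => if diff.getD m 0 > 0 then "A" else "B"

-- ===== PRECONDITION & SPEC =====
def Spec_solve (a : Int) (a_lst : List Int) (b : Int) (b_lst : List Int) (out : String) : Prop := out = solve_alt a a_lst b b_lst
instance (a : Int) (a_lst : List Int) (b : Int) (b_lst : List Int) (out : String) : Decidable (Spec_solve a a_lst b b_lst out) := by unfold Spec_solve; infer_instance

-- ===== CLAIM (what is proved, stated in full; the proofs are below) =====
def Claim_equal_solve : Prop := ∀ (a : Int) (a_lst : List Int) (b : Int) (b_lst : List Int), Dom_solve a a_lst b b_lst → Spec_solve a a_lst b b_lst (solve a a_lst b b_lst)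

-- ===== LEMMAS AND PROOFS =====

-- the common specification: the largest value whose multiplicities in xs and ys differ decides
def verdict (xs ys : List Int) : String :=
  match PySem.List.max? ((xs ++ ys).filter (fun v => decide ((xs.count v : Int) ≠ (ys.count v : Int)))) (fun k => k) with
  | none => "D"
  | some m => if (ys.count m : Int) < (xs.count m : Int) then "A" else "B"

theorem max?_id_unique {l l' : List Int} (hmem : ∀ x, x ∈ l ↔ x ∈ l') :
    PySem.List.max? l (fun k => k) = PySem.List.max? l' (fun k => k) := by
  cases hl : PySem.List.max? l (fun k => k) with
  | none =>
    rw [PySem.List.max?_eq_none_iff] at hl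
    cases hl' : PySem.List.max? l' (fun k => k) with
    | none => rfl
    | some m' =>
      have hm' := PySem.List.max?_mem hl'
      rw [← hmem] at hm'
      simp [hl] at hm'
  | some m =>
    have hm := PySem.List.max?_mem hl
    have hmax := PySem.List.max?_isMax hl
    cases hl' : PySem.List.max? l' (fun k => k) with
    | none =>
      rw [PySem.List.max?_eq_none_iff] at hl'
      rw [hmem] at hm
      simp [hl'] at hm
    | some m' =>
      have hm'2 := PySem.List.max?_mem hl'
      have hmax' := PySem.List.max?_isMax hl'
      have h1 : m ≤ m' := hmax' m ((hmem m).mp hm)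
      have h2 : m' ≤ m := hmax m' ((hmem m').mpr hm'2)
      simp [le_antisymm h1 h2]

theorem mem_filter_cnt (xs ys : List Int) (v : Int) :
    v ∈ (xs ++ ys).filter (fun v => decide ((xs.count v : Int) ≠ (ys.count v : Int)))
      ↔ (xs.count v : Int) ≠ (ys.count v : Int) := by
  simp only [List.mem_filter, List.mem_append, decide_eq_true_eq]
  constructor
  · exact fun h => h.2
  · intro h
    refine ⟨?_, h⟩
    by_contra hmem
    push_neg at hmem
    rw [List.count_eq_zero_of_not_mem hmem.1, List.count_eq_zero_of_not_mem hmem.2] at h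
    exact h rfl

theorem verdict_congr {xs ys xs' ys' : List Int}
    (h : ∀ v, (xs.count v : Int) - ys.count v = (xs'.count v : Int) - ys'.count v) :
    verdict xs ys = verdict xs' ys' := by
  have hcnt : ∀ v, ((xs.count v : Int) ≠ ys.count v) ↔ ((xs'.count v : Int) ≠ ys'.count v) := by
    intro v; have := h v; constructor <;> intro hne heq <;> omega
  have hm : PySem.List.max? ((xs ++ ys).filter (fun v => decide ((xs.count v : Int) ≠ (ys.count v : Int)))) (fun k => k)
      = PySem.List.max? ((xs' ++ ys').filter (fun v => decide ((xs'.count v : Int) ≠ (ys'.count v : Int)))) (fun k => k) := by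
    apply max?_id_unique
    intro x
    rw [mem_filter_cnt, mem_filter_cnt]
    exact hcnt x
  unfold verdict
  rw [hm]
  cases hmx : PySem.List.max? ((xs' ++ ys').filter (fun v => decide ((xs'.count v : Int) ≠ (ys'.count v : Int)))) (fun k => k) with
  | none => rfl
  | some m =>
    have := h m
    by_cases hlt : (ys.count m : Int) < (xs.count m : Int) <;>
      by_cases hlt' : (ys'.count m : Int) < (xs'.count m : Int) <;>
      simp [hlt, hlt'] <;> omega

theorem pairwise_le_getLast (xs : List Int) (hxs : xs ≠ []) (hx : xs.Pairwise (· ≤ ·)) :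
    ∀ v ∈ xs, v ≤ xs.getLast hxs := by
  intro v hv
  have e : xs.dropLast ++ [xs.getLast hxs] = xs := List.dropLast_append_getLast hxs
  rw [← e] at hv hx
  rw [List.pairwise_append] at hx
  rcases List.mem_append.mp hv with h | h
  · exact hx.2.2 v h _ (List.mem_singleton_self _)
  · rw [List.mem_singleton] at h; exact le_of_eq h

theorem max?_id_eq_of {X : Int} {l : List Int} (hX : X ∈ l) (hmax : ∀ v ∈ l, v ≤ X) :
    PySem.List.max? l (fun k => k) = some X := by
  cases h : PySem.List.max? l (fun k => k) with
  | none =>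
    rw [PySem.List.max?_eq_none_iff] at h
    subst h; simp at hX
  | some m =>
    have hm := PySem.List.max?_mem h
    have hmm := PySem.List.max?_isMax h
    have := le_antisymm (hmax m hm) (hmm X hX)
    simp [this]

theorem loopA_eq_verdict (xs ys : List Int)
    (hx : xs.Pairwise (· ≤ ·)) (hy : ys.Pairwise (· ≤ ·)) :
    solveLoopA xs ys = verdict xs ys := by
  induction hn : xs.length using Nat.strong_induction_on generalizing xs ys with
  | _ n ih =>
  by_cases hxs : xs = []
  · subst hxs
    rw [solveLoopA]
    simp only [ne_eq, not_true_eq_false, false_and, dite_false, ite_false]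
    have hfilt : (([] : List Int) ++ ys).filter (fun v => decide (((List.count v ([] : List Int)) : Int) ≠ (ys.count v : Int))) = ys := by
      apply List.filter_eq_self.mpr
      intro v hv
      simp only [List.nil_append] at hv ⊢
      have : 0 < ys.count v := List.count_pos_iff.mpr hv
      simp only [List.count_nil, decide_eq_true_eq]
      omega
    unfold verdict
    simp only [List.count_nil] at hfilt ⊢
    rw [hfilt]
    cases hm : PySem.List.max? ys (fun k => k) with
    | none =>
      rw [PySem.List.max?_eq_none_iff] at hm
      simp [hm]
    | some m =>
      have hmem := PySem.List.max?_mem hm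
      have hc : 0 < ys.count m := List.count_pos_iff.mpr hmem
      have hys : ys ≠ [] := by rintro rfl; simp at hmem
      have hno : ¬ ((ys.count m : Int) < ((0 : Nat) : Int)) := by omega
      simp [hys]
  · by_cases hys : ys = []
    · subst hys
      rw [solveLoopA]
      simp only [ne_eq, not_true_eq_false, and_false, dite_false, hxs, not_false_eq_true, ite_true]
      have hfilt : (xs ++ ([] : List Int)).filter (fun v => decide ((xs.count v : Int) ≠ ((List.count v ([] : List Int)) : Int))) = xs := by
        rw [List.append_nil]
        apply List.filter_eq_self.mpr
        intro v hv
        have : 0 < xs.count v := List.count_pos_iff.mpr hv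
        simp only [List.count_nil, decide_eq_true_eq]
        omega
      unfold verdict
      simp only [List.count_nil] at hfilt ⊢
      rw [hfilt]
      cases hm : PySem.List.max? xs (fun k => k) with
      | none => rw [PySem.List.max?_eq_none_iff] at hm; exact absurd hm hxs
      | some m =>
        have hmem := PySem.List.max?_mem hm
        have hc : 0 < xs.count m := List.count_pos_iff.mpr hmem
        simp
        exact hmem
    · have hXmax := pairwise_le_getLast xs hxs hx
      have hYmax := pairwise_le_getLast ys hys hy
      rw [solveLoopA, dif_pos (And.intro hxs hys)]
      by_cases hgt : xs.getLast hxs > ys.getLast hys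
      · rw [if_pos hgt]
        have hXnotys : xs.getLast hxs ∉ ys := fun h => absurd (hYmax _ h) (by omega)
        have h1 : 0 < xs.count (xs.getLast hxs) := List.count_pos_iff.mpr (List.getLast_mem hxs)
        have h2 : ys.count (xs.getLast hxs) = 0 := List.count_eq_zero_of_not_mem hXnotys
        have hXfilt : xs.getLast hxs ∈ (xs ++ ys).filter (fun v => decide ((xs.count v : Int) ≠ (ys.count v : Int))) := by
          rw [mem_filter_cnt]; omega
        have hbound : ∀ v ∈ (xs ++ ys).filter (fun v => decide ((xs.count v : Int) ≠ (ys.count v : Int))), v ≤ xs.getLast hxs := by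
          intro v hv
          rcases List.mem_append.mp (List.mem_of_mem_filter hv) with h | h
          · exact hXmax v h
          · exact le_trans (hYmax v h) (le_of_lt hgt)
        unfold verdict
        rw [max?_id_eq_of hXfilt hbound]
        have hlt2 : ((ys.count (xs.getLast hxs) : Int) < (xs.count (xs.getLast hxs) : Int)) := by omega
        simp [hlt2]
      · by_cases hlt : xs.getLast hxs < ys.getLast hys
        · rw [if_neg hgt, if_pos hlt]
          have hYnotxs : ys.getLast hys ∉ xs := fun h => absurd (hXmax _ h) (by omega)
          have h1 : 0 < ys.count (ys.getLast hys) := List.count_pos_iff.mpr (List.getLast_mem hys)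
          have h2 : xs.count (ys.getLast hys) = 0 := List.count_eq_zero_of_not_mem hYnotxs
          have hYfilt : ys.getLast hys ∈ (xs ++ ys).filter (fun v => decide ((xs.count v : Int) ≠ (ys.count v : Int))) := by
            rw [mem_filter_cnt]; omega
          have hbound : ∀ v ∈ (xs ++ ys).filter (fun v => decide ((xs.count v : Int) ≠ (ys.count v : Int))), v ≤ ys.getLast hys := by
            intro v hv
            rcases List.mem_append.mp (List.mem_of_mem_filter hv) with h | h
            · exact le_trans (hXmax v h) (le_of_lt hlt)
            · exact hYmax v h
          unfold verdict
          rw [max?_id_eq_of hYfilt hbound]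
          have hno : ¬ ((ys.count (ys.getLast hys) : Int) < (xs.count (ys.getLast hys) : Int)) := by omega
          simp [hno]
        · have hXY : xs.getLast hxs = ys.getLast hys := by omega
          rw [if_neg hgt, if_neg hlt]
          have hx' : xs.dropLast.Pairwise (· ≤ ·) := List.Pairwise.sublist (List.dropLast_sublist xs) hx
          have hy' : ys.dropLast.Pairwise (· ≤ ·) := List.Pairwise.sublist (List.dropLast_sublist ys) hy
          have hlen : xs.dropLast.length < n := by
            have h0 : 0 < xs.length := List.length_pos_iff.mpr hxs
            rw [List.length_dropLast]; omega
          rw [ih _ hlen _ _ hx' hy' rfl]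
          apply verdict_congr
          intro v
          have c1 : xs.count v = xs.dropLast.count v + [xs.getLast hxs].count v := by
            rw [← List.count_append, List.dropLast_append_getLast hxs]
          have c2 : ys.count v = ys.dropLast.count v + [ys.getLast hys].count v := by
            rw [← List.count_append, List.dropLast_append_getLast hys]
          rw [hXY] at c1
          push_cast [c1, c2]
          ring


theorem getD_foldl_insert_sub_one (l : List Int) (d : PySem.Dict Int Int) (v : Int) :
    (l.foldl (fun d y => d.insert y (d.getD y 0 - 1)) d).getD v 0 = d.getD v 0 - l.count v := by
  induction l generalizing d with
  | nil => simp
  | cons y t ih =>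
    simp only [List.foldl_cons]
    rw [ih, PySem.Dict.getD_insert, List.count_cons]
    by_cases h : v = y
    · subst h; simp; ring
    · have h2 : ¬ ((y == v) = true) := by simp [ne_comm.mp h]
      simp [h, h2]

theorem alt_eq_verdict (a : Int) (a_lst : List Int) (b : Int) (b_lst : List Int) :
    solve_alt a a_lst b b_lst = verdict a_lst b_lst := by
  unfold solve_alt
  have hd0 : a_lst.foldl (fun d x => d.insert x (d.getD x 0 + 1)) (PySem.Dict.empty : PySem.Dict Int Int)
      = PySem.Dict.counter a_lst := PySem.Dict.foldl_insert_getD_add_one_eq_counter a_lst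
  rw [hd0]
  set d := b_lst.foldl (fun d y => d.insert y (d.getD y 0 - 1)) (PySem.Dict.counter a_lst) with hd
  have hnodup : d.keys.Nodup := by
    rw [hd]
    exact PySem.Dict.nodup_keys_foldl_insert b_lst _ _ (PySem.Dict.nodup_keys_counter a_lst)
  have hgetD : ∀ v, d.getD v 0 = (a_lst.count v : Int) - b_lst.count v := by
    intro v
    rw [hd, getD_foldl_insert_sub_one, PySem.Dict.getD_counter]
  have hkeys : ∀ k, k ∈ d.keys ↔ (k ∈ a_lst ∨ k ∈ b_lst) := by
    intro k
    rw [hd, PySem.Dict.keys_foldl_insert, PySem.Set.mem_update, PySem.Dict.keys_counter,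
      PySem.Set.mem_ofList]
  have hmemkeys : ∀ k, k ∈ (d.items.filter (fun kv => kv.2 != 0)).map Prod.fst
      ↔ (a_lst.count k : Int) ≠ (b_lst.count k : Int) := by
    intro k
    constructor
    · intro h
      obtain ⟨kv, hkv, hk⟩ := List.mem_map.mp h
      obtain ⟨k', v⟩ := kv
      have hk' : k' = k := hk
      subst hk'
      rcases List.mem_filter.mp hkv with ⟨hmem, hv⟩
      have hget : d.get? k' = some v := (PySem.Dict.get?_eq_some_iff_mem_items d k' v hnodup).mpr hmem
      have : d.getD k' 0 = v := PySem.Dict.getD_of_get?_eq_some d 0 hget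
      rw [hgetD k'] at this
      simp only [bne_iff_ne, ne_eq] at hv
      omega
    · intro h
      have hmem : k ∈ d.keys := by
        rw [hkeys]
        by_contra hc
        push_neg at hc
        rw [List.count_eq_zero_of_not_mem hc.1, List.count_eq_zero_of_not_mem hc.2] at h
        exact h rfl
      have hget : d.get? k ≠ none := by
        rw [ne_eq, PySem.Dict.get?_eq_none_iff_not_mem_keys]
        simp [hmem]
      obtain ⟨v, hv⟩ := Option.ne_none_iff_exists'.mp hget
      have hgv : d.getD k 0 = v := PySem.Dict.getD_of_get?_eq_some d 0 hv
      have hvne : v ≠ 0 := by rw [← hgv, hgetD k]; omega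
      apply List.mem_map.mpr
      refine ⟨(k, v), List.mem_filter.mpr ⟨PySem.Dict.mem_items_of_get?_eq_some d hv, by simpa using hvne⟩, rfl⟩
  have hmax : PySem.List.max? ((d.items.filter (fun kv => kv.2 != 0)).map Prod.fst) (fun k => k)
      = PySem.List.max? ((a_lst ++ b_lst).filter (fun v => decide ((a_lst.count v : Int) ≠ (b_lst.count v : Int)))) (fun k => k) := by
    apply max?_id_unique
    intro x
    rw [hmemkeys, mem_filter_cnt]
  change (match PySem.List.max? ((d.items.filter (fun kv => kv.2 != 0)).map Prod.fst) (fun k => k) with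
    | none => "D"
    | some m => if d.getD m 0 > 0 then "A" else "B") = _
  unfold verdict
  rw [hmax]
  cases hm : PySem.List.max? ((a_lst ++ b_lst).filter (fun v => decide ((a_lst.count v : Int) ≠ (b_lst.count v : Int)))) (fun k => k) with
  | none => rfl
  | some m =>
    have := hgetD m
    show (if d.getD m 0 > 0 then "A" else "B")
        = (if ((b_lst.count m : Int) < (a_lst.count m : Int)) then "A" else "B")
    by_cases hc : (b_lst.count m : Int) < (a_lst.count m : Int)
    · rw [if_pos hc, if_pos (by omega : d.getD m 0 > 0)]
    · rw [if_neg hc, if_neg (by omega : ¬ d.getD m 0 > 0)]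

-- ===== VERDICT (by name: the statement is the Claim_ definition above) =====
theorem solve_spec : Claim_equal_solve := by
  intro a a_lst b b_lst _
  unfold Spec_solve solve
  rw [alt_eq_verdict,
    loopA_eq_verdict _ _ (PySem.List.sorted_pairwise a_lst (fun x => x))
      (PySem.List.sorted_pairwise b_lst (fun x => x))]
  exact verdict_congr (fun v => by
    rw [(PySem.List.sorted_perm a_lst (fun x => x) false).count_eq,
        (PySem.List.sorted_perm b_lst (fun x => x) false).count_eq])
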